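-- pv_equiv track=rewrite | github.com/rdguerrerom/Fast_Chess_Agent | agent/agent_v2.py | _generate_promotions
-- ===== SOURCE A (Python) =====
-- from typing import List, Tuple, Optional, Dict, Any
--
-- def _generate_promotions(to_bb: int, shift: int) -> List[Tuple[int, int, str]]:
--     """
--     Generate pawn promotion moves.
--     """
--     moves = []
--     temp_to_bb = to_bb
--     while temp_to_bb:
--         lsb = temp_to_bb & -temp_to_bb
--         to_square = lsb.bit_length() - 1
--         from_square = to_square - shift
--         if 0 <= from_square < 64 and 0 <= to_square < 64:
--             for promotion_piece in ['Q', 'R', 'B', 'N']: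
--                 moves.append((from_square, to_square, promotion_piece))
--         temp_to_bb &= temp_to_bb - 1
--     return moves
-- ===== SOURCE B (Python) =====
-- from typing import List, Tuple
--
--
-- def _set_squares(bb: int) -> List[int]:
--     """Indices of set bits, in increasing order, by binary divide-and-conquer."""
--     if bb == 0:
--         return []
--     n = bb.bit_length()
--     if n == 1:
--         return [0]
--     k = n // 2
--     low = _set_squares(bb & ((1 << k) - 1))
--     high = _set_squares(bb >> k)
--     return low + [k + s for s in high]
--
--
-- def _generate_promotions(to_bb: int, shift: int) -> List[Tuple[int, int, str]]:
--     """Generate pawn promotion moves (squares first, then cross with pieces)."""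
--     return [(sq - shift, sq, piece)
--             for sq in _set_squares(to_bb)
--             if 0 <= sq - shift < 64 and sq < 64
--             for piece in ('Q', 'R', 'B', 'N')]
-- ===== Notes on version B (the rewrite author's own statement) =====
-- stated objective: alternative
-- what changed: Replaces A's destructive while-loop that repeatedly isolates and clears the lowest set bit (n & -n, bit_length, n &= n-1) with a binary divide-and-conquer helper that splits the bitboard at half its bit-length into low/high halves and recursively collects the set-square list, followed by a separate cross-product pass with the piece letters.
import Mathlib
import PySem

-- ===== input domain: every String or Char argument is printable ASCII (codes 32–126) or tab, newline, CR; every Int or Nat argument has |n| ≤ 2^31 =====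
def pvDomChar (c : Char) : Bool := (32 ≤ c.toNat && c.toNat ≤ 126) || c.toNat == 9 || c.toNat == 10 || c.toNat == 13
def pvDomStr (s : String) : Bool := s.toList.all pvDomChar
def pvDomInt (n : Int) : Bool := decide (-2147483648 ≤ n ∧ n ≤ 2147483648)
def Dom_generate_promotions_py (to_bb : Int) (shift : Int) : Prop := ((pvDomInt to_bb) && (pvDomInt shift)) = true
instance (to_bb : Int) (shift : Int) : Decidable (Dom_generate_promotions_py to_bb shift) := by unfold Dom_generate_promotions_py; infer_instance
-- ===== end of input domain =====

-- B replaces A's destructive lowest-set-bit loop by a binary divide-and-conquer extraction of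
-- the set-square list, followed by a separate cross-product pass with the piece letters
-- (alternative decomposition; same return value on every input where A terminates).

-- ===== PORT A =====
-- while temp_to_bb: extract lowest set bit, append 4 promotion tuples, clear the bit.
-- Structural recursion on a fuel counter (totality guard only; natAbs+1 iterations always
-- suffice since the loop runs once per set bit). For temp < 0 Python loops forever (outside Pre_).
def pyALoop (shift : Int) : Nat → Int → List (Int × Int × String)
  | 0, _ => []
  | fuel + 1, temp =>
    if temp = 0 then []
    else
      let lsb := PySem.Int.band temp (-temp)
      let to_square : Int := (PySem.Int.bitLength lsb : Int) - 1
      let from_square : Int := to_square - shift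
      (if 0 ≤ from_square ∧ from_square < 64 ∧ 0 ≤ to_square ∧ to_square < 64 then
        [(from_square, to_square, "Q"), (from_square, to_square, "R"),
         (from_square, to_square, "B"), (from_square, to_square, "N")]
      else []) ++ pyALoop shift fuel (PySem.Int.band temp (temp - 1))

def generate_promotions_py (to_bb : Int) (shift : Int) : List (Int × Int × String) :=
  pyALoop shift (to_bb.natAbs + 1) to_bb

-- ===== PORT B =====
-- _set_squares: binary divide-and-conquer on the bitboard. Ported with a fuel counter as a
-- totality guard only (natAbs+1 always suffices: for bb > 0 both recursive arguments are
-- strictly smaller nonnegative ints). `1 << k` is ported as the Nat shift (k ≥ 0, exact);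
-- `bb >> k` as Int arithmetic shift, which is exact for Python's `>>`.
def pySetSquares : Nat → Int → List Int
  | 0, _ => []
  | fuel + 1, bb =>
    if bb = 0 then []
    else
      let n := PySem.Int.bitLength bb
      if n = 1 then [(0 : Int)]
      else
        let k := n / 2
        pySetSquares fuel (PySem.Int.band bb (((1 <<< k : Nat) : Int) - 1)) ++
          (pySetSquares fuel (bb >>> k)).map (fun s => (k : Int) + s)

def generate_promotions_py_alt (to_bb : Int) (shift : Int) : List (Int × Int × String) :=
  (pySetSquares (to_bb.natAbs + 1) to_bb).flatMap fun sq =>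
    if 0 ≤ sq - shift ∧ sq - shift < 64 ∧ sq < 64 then
      ["Q", "R", "B", "N"].map fun p => (sq - shift, sq, p)
    else []

-- ===== PRECONDITION & SPEC =====
-- A's while loop never terminates for negative to_bb (temp &= temp - 1 stays negative forever),
-- so Pre_ admits exactly the inputs on which Python A returns: nonnegative bitboards.
def Pre_generate_promotions_py (to_bb : Int) (shift : Int) : Prop := 0 ≤ to_bb
instance (to_bb : Int) (shift : Int) : Decidable (Pre_generate_promotions_py to_bb shift) := by
  unfold Pre_generate_promotions_py; infer_instance

def pvWitness_generate_promotions_py : Int × Int := (5, -2)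

def Spec_generate_promotions_py (to_bb : Int) (shift : Int) (out : List (Int × Int × String)) : Prop :=
  out = generate_promotions_py_alt to_bb shift
instance (to_bb : Int) (shift : Int) (out : List (Int × Int × String)) : Decidable (Spec_generate_promotions_py to_bb shift out) := by
  unfold Spec_generate_promotions_py; infer_instance

-- ===== CLAIM (what is proved, stated in full; the proofs are below) =====
def Claim_equal_generate_promotions_py : Prop := ∀ (to_bb : Int) (shift : Int), Dom_generate_promotions_py to_bb shift → Pre_generate_promotions_py to_bb shift → Spec_generate_promotions_py to_bb shift (generate_promotions_py to_bb shift)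

-- ===== LEMMAS AND PROOFS =====

-- The four promotion tuples produced at target square sq (A's guard shape).
def pvTup (shift sq : Int) : List (Int × Int × String) :=
  if 0 ≤ sq - shift ∧ sq - shift < 64 ∧ 0 ≤ sq ∧ sq < 64 then
    [(sq - shift, sq, "Q"), (sq - shift, sq, "R"), (sq - shift, sq, "B"), (sq - shift, sq, "N")]
  else []

-- A-side model: scan the bits of n from the low end, off = absolute square of the current bit.
def pvScan (shift : Int) (n off : Nat) : List (Int × Int × String) :=
  if h : n = 0 then []
  else
    (if n % 2 = 1 then pvTup shift (off : Int) else []) ++ pvScan shift (n / 2) (off + 1)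
termination_by n
decreasing_by exact Nat.div_lt_self (Nat.pos_of_ne_zero h) one_lt_two

-- common model: list of set-bit positions, low to high, offset by off
def pvPos (n off : Nat) : List Nat :=
  if h : n = 0 then []
  else
    (if n % 2 = 1 then [off] else []) ++ pvPos (n / 2) (off + 1)
termination_by n
decreasing_by exact Nat.div_lt_self (Nat.pos_of_ne_zero h) one_lt_two

lemma pvPos_zero (off : Nat) : pvPos 0 off = [] := by rw [pvPos]; simp

-- trailing zeros and clear-lowest-set-bit, by binary recursion
def pvTz : Nat → Nat :=
  fun n =>
    if h : n = 0 then 0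
    else if n % 2 = 1 then 0 else pvTz (n / 2) + 1
termination_by n => n
decreasing_by exact Nat.div_lt_self (Nat.pos_of_ne_zero h) one_lt_two

def pvClr : Nat → Nat :=
  fun n =>
    if h : n = 0 then 0
    else if n % 2 = 1 then n - 1 else 2 * pvClr (n / 2)
termination_by n => n
decreasing_by exact Nat.div_lt_self (Nat.pos_of_ne_zero h) one_lt_two

lemma pvClr_lt {n : Nat} (h : n ≠ 0) : pvClr n < n := by
  induction n using Nat.strong_induction_on with
  | _ n ih =>
    rw [pvClr]
    rw [dif_neg h]
    split_ifs with hp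
    · omega
    · by_cases hm : n / 2 = 0
      · omega
      · have := ih (n / 2) (Nat.div_lt_self (Nat.pos_of_ne_zero h) one_lt_two) hm
        omega

-- halving identities for the bitwise operations
lemma pvLand_bit (a b e f : Nat) (he : e < 2) (hf : f < 2) :
    (2 * a + e) &&& (2 * b + f) = 2 * (a &&& b) + min e f := by
  apply Nat.eq_of_testBit_eq
  intro i
  cases i with
  | zero =>
    rw [Nat.testBit_land]
    simp only [Nat.testBit_zero]
    have h1 : (2 * a + e) % 2 = e := by omega
    have h2 : (2 * b + f) % 2 = f := by omega
    have h3 : (2 * (a &&& b) + min e f) % 2 = min e f := by omega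
    rw [h1, h2, h3]
    interval_cases e <;> interval_cases f <;> simp
  | succ i =>
    rw [Nat.testBit_land]
    simp only [Nat.testBit_add_one]
    have h1 : (2 * a + e) / 2 = a := by omega
    have h2 : (2 * b + f) / 2 = b := by omega
    have h3 : (2 * (a &&& b) + min e f) / 2 = a &&& b := by omega
    rw [h1, h2, h3, Nat.testBit_land]

-- n & (n-1) clears the lowest set bit
lemma pvLand_pred {n : Nat} (h : n ≠ 0) : n &&& (n - 1) = pvClr n := by
  induction n using Nat.strong_induction_on with
  | _ n ih =>
    rw [pvClr, dif_neg h]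
    rcases Nat.mod_two_eq_zero_or_one n with hp | hp
    · rw [if_neg (by omega)]
      have hm : n / 2 ≠ 0 := by omega
      have h1 : n = 2 * (n / 2) + 0 := by omega
      have h2 : n - 1 = 2 * (n / 2 - 1) + 1 := by omega
      calc n &&& (n - 1) = (2 * (n / 2) + 0) &&& (2 * (n / 2 - 1) + 1) := by rw [← h1, ← h2]
        _ = 2 * ((n / 2) &&& (n / 2 - 1)) + min 0 1 := pvLand_bit _ _ _ _ (by omega) (by omega)
        _ = 2 * pvClr (n / 2) := by
              rw [ih (n / 2) (Nat.div_lt_self (Nat.pos_of_ne_zero h) one_lt_two) hm]; omega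
    · rw [if_pos hp]
      have h1 : n = 2 * (n / 2) + 1 := by omega
      have h2 : n - 1 = 2 * (n / 2) + 0 := by omega
      calc n &&& (n - 1) = (2 * (n / 2) + 1) &&& (2 * (n / 2) + 0) := by rw [← h1, ← h2]
        _ = 2 * ((n / 2) &&& (n / 2)) + min 1 0 := pvLand_bit _ _ _ _ (by omega) (by omega)
        _ = n - 1 := by rw [Nat.and_self]; omega

-- removing the cleared low bits isolates the lowest set bit as a power of two
lemma pvSub_clr {n : Nat} (h : n ≠ 0) : n - pvClr n = 2 ^ pvTz n := by
  induction n using Nat.strong_induction_on with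
  | _ n ih =>
    rw [pvClr, dif_neg h, pvTz, dif_neg h]
    rcases Nat.mod_two_eq_zero_or_one n with hp | hp
    · rw [if_neg (by omega), if_neg (by omega)]
      have hm : n / 2 ≠ 0 := by omega
      have hlt := pvClr_lt hm
      have := ih (n / 2) (Nat.div_lt_self (Nat.pos_of_ne_zero h) one_lt_two) hm
      have hpow : 2 ^ (pvTz (n / 2) + 1) = 2 * 2 ^ pvTz (n / 2) := by
        rw [Nat.pow_succ]; ring
      omega
    · rw [if_pos hp, if_pos hp]
      have : 2 ^ 0 = 1 := by norm_num
      omega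

lemma pvBitLength_pow (k : Nat) : PySem.Int.bitLength ((2 ^ k : Nat) : Int) = k + 1 := by
  induction k with
  | zero =>
    simp only [pow_zero]
    rw [PySem.Int.bitLength_natCast (by norm_num : (0 : Nat) < 1)]
    norm_num [PySem.Int.bitLength_zero]
  | succ k ih =>
    rw [PySem.Int.bitLength_natCast (by positivity : (0 : Nat) < 2 ^ (k + 1))]
    have h1 : 2 ^ (k + 1) / 2 = 2 ^ k := by
      rw [Nat.pow_succ, Nat.mul_div_cancel _ (by omega)]
    rw [h1, ih]

-- skip lemma: scanning equals emitting the lowest set bit then scanning the rest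
lemma pvScan_double (shift : Int) (c off : Nat) :
    pvScan shift (2 * c) off = pvScan shift c (off + 1) := by
  by_cases hc : c = 0
  · subst hc
    rw [pvScan, pvScan]
    simp
  · rw [pvScan, dif_neg (by omega : ¬ 2 * c = 0), if_neg (by omega : ¬ 2 * c % 2 = 1)]
    have h1 : 2 * c / 2 = c := by omega
    rw [h1, List.nil_append]

lemma pvScan_skip (shift : Int) {n : Nat} (h : n ≠ 0) (off : Nat) :
    pvScan shift n off = pvTup shift ((off + pvTz n : Nat) : Int) ++ pvScan shift (pvClr n) off := by
  induction n using Nat.strong_induction_on generalizing off with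
  | _ n ih =>
    rcases Nat.mod_two_eq_zero_or_one n with hp | hp
    · have hm : n / 2 ≠ 0 := by omega
      have htz : pvTz n = pvTz (n / 2) + 1 := by rw [pvTz, dif_neg h, if_neg (by omega)]
      have hclr : pvClr n = 2 * pvClr (n / 2) := by rw [pvClr, dif_neg h, if_neg (by omega)]
      rw [pvScan, dif_neg h, if_neg (by omega), List.nil_append,
          ih (n / 2) (Nat.div_lt_self (Nat.pos_of_ne_zero h) one_lt_two) hm (off + 1),
          htz, hclr, pvScan_double]
      have harg : off + 1 + pvTz (n / 2) = off + (pvTz (n / 2) + 1) := by omega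
      rw [harg]
    · have htz : pvTz n = 0 := by rw [pvTz, dif_neg h, if_pos hp]
      have hclr : pvClr n = n - 1 := by rw [pvClr, dif_neg h, if_pos hp]
      rw [pvScan, dif_neg h, if_pos hp, htz, hclr, Nat.add_zero]
      congr 1
      have h2 : n - 1 = 2 * (n / 2) := by omega
      rw [h2, pvScan_double]

-- A's loop equals the scan model
lemma pvALoop_eq_scan (shift : Int) (fuel n : Nat) (hf : n < fuel) :
    pyALoop shift fuel (n : Int) = pvScan shift n 0 := by
  induction fuel generalizing n with
  | zero => omega
  | succ fuel ih =>
    by_cases hn : n = 0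
    · subst hn
      rw [pvScan]
      simp [pyALoop]
    · have hlsb : PySem.Int.band (n : Int) (-(n : Int)) = ((n - pvClr n : Nat) : Int) := by
        have h0 : ¬ (0 : Int) ≤ -((n : Nat) : Int) := by omega
        have h1 : (0 : Int) ≤ ((n : Nat) : Int) := Int.natCast_nonneg n
        simp only [PySem.Int.band, if_pos h1, if_neg h0, neg_neg]
        have h2 : (((n : Nat) : Int)).toNat = n := Int.toNat_natCast n
        have h3 : (((n : Nat) : Int) - 1).toNat = n - 1 := by omega
        rw [h2, h3, pvLand_pred hn]
      have hone : ((n : Nat) : Int) - 1 = ((n - 1 : Nat) : Int) := by omega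
      have hnext : PySem.Int.band (n : Int) ((n : Int) - 1) = ((pvClr n : Nat) : Int) := by
        rw [hone, PySem.Int.band_natCast, pvLand_pred hn]
      have hts : (PySem.Int.bitLength (PySem.Int.band (n : Int) (-(n : Int))) : Int) - 1
          = ((pvTz n : Nat) : Int) := by
        rw [hlsb, pvSub_clr hn, pvBitLength_pow]
        push_cast
        ring
      rw [pyALoop]
      rw [if_neg (by exact_mod_cast hn)]
      simp only [hts, hnext]
      rw [ih (pvClr n) (by have := pvClr_lt hn; omega)]
      rw [pvScan_skip shift hn 0]
      unfold pvTup
      simp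

-- the scan model is the flatMap of pvTup over the position list
lemma pvScan_eq_flatMap (shift : Int) (n off : Nat) :
    pvScan shift n off = (pvPos n off).flatMap (fun (s : Nat) => pvTup shift (s : Int)) := by
  induction n using Nat.strong_induction_on generalizing off with
  | _ n ih =>
    by_cases hn : n = 0
    · subst hn; rw [pvScan, pvPos_zero]; simp
    · rw [pvScan, dif_neg hn]
      conv_rhs => rw [pvPos, dif_neg hn]
      rw [List.flatMap_append,
          ih (n / 2) (Nat.div_lt_self (Nat.pos_of_ne_zero hn) one_lt_two) (off + 1)]
      congr 1
      split_ifs <;> simp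


-- shifting the offset shifts every emitted position
lemma pvPos_add (a : Nat) (n : Nat) : ∀ off, pvPos n (a + off) = (pvPos n off).map (a + ·) := by
  induction n using Nat.strong_induction_on with
  | _ n ih =>
    intro off
    by_cases hn : n = 0
    · subst hn; rw [pvPos_zero, pvPos_zero]; simp
    · rw [pvPos, dif_neg hn]
      conv_rhs => rw [pvPos, dif_neg hn]
      rw [List.map_append,
          show a + off + 1 = a + (off + 1) by omega,
          ih (n / 2) (Nat.div_lt_self (Nat.pos_of_ne_zero hn) one_lt_two) (off + 1)]
      congr 1
      split_ifs <;> simp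

-- splitting the bitboard at position k splits the position list
lemma pvPos_split (k : Nat) : ∀ (n off : Nat),
    pvPos n off = pvPos (n % 2 ^ k) off ++ pvPos (n / 2 ^ k) (off + k) := by
  induction k with
  | zero =>
    intro n off
    simp [pow_zero, Nat.mod_one, Nat.div_one, pvPos_zero]
  | succ k ih =>
    intro n off
    by_cases hn : n = 0
    · subst hn
      simp [pvPos_zero, Nat.zero_mod, Nat.zero_div]
    · have hpow : 2 ^ (k + 1) = 2 * 2 ^ k := by rw [Nat.pow_succ]; ring
      have e1 : n % 2 ^ (k + 1) % 2 = n % 2 := by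
        exact Nat.mod_mod_of_dvd n (by rw [hpow]; exact Dvd.intro _ rfl)
      have e2 : n % 2 ^ (k + 1) / 2 = n / 2 % 2 ^ k := by
        rw [hpow]; exact Nat.mod_mul_right_div_self n 2 (2 ^ k)
      have e3 : n / 2 ^ (k + 1) = n / 2 / 2 ^ k := by
        rw [hpow, ← Nat.div_div_eq_div_mul]
      have e4 : off + (k + 1) = off + 1 + k := by omega
      rw [pvPos, dif_neg hn, ih (n / 2) (off + 1), e3, e4]
      by_cases hz : n % 2 ^ (k + 1) = 0
      · have hb : n % 2 = 0 := by rw [← e1, hz]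
        have hq : n / 2 % 2 ^ k = 0 := by rw [← e2, hz]
        rw [hz, hq, pvPos_zero, pvPos_zero, if_neg (by omega : ¬ n % 2 = 1)]
        simp
      · conv_rhs => rw [pvPos, dif_neg hz]
        rw [e1, e2, List.append_assoc]

-- m has exactly one binary digit iff m = 1
lemma pvBitLength_one {m : Nat} (hm : m ≠ 0) (h : PySem.Int.bitLength (m : Int) = 1) : m = 1 := by
  rw [PySem.Int.bitLength_natCast (Nat.pos_of_ne_zero hm)] at h
  have h0 : PySem.Int.bitLength ((m / 2 : Nat) : Int) = 0 := by omega
  have := PySem.Int.lt_two_pow_bitLength ((m / 2 : Nat) : Int)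
  rw [h0] at this
  simp only [pow_zero, Int.natAbs_natCast] at this
  omega

lemma pvBitLength_pos {m : Nat} (hm : m ≠ 0) : 1 ≤ PySem.Int.bitLength (m : Int) := by
  rw [PySem.Int.bitLength_natCast (Nat.pos_of_ne_zero hm)]
  omega

-- B's divide-and-conquer square extraction equals the position list
lemma pvSetSquares_eq (fuel : Nat) : ∀ (m : Nat), m < fuel →
    pySetSquares fuel (m : Int) = (pvPos m 0).map (fun (s : Nat) => (s : Int)) := by
  induction fuel with
  | zero => omega
  | succ fuel ih =>
    intro m hf
    by_cases hm : m = 0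
    · subst hm
      rw [pySetSquares, pvPos_zero]
      simp
    · rw [pySetSquares, if_neg (by exact_mod_cast hm)]
      by_cases h1 : PySem.Int.bitLength (m : Int) = 1
      · rw [if_pos h1]
        have := pvBitLength_one hm h1
        subst this
        rw [pvPos, dif_neg (by omega : ¬ (1 : Nat) = 0)]
        norm_num [pvPos_zero]
      · rw [if_neg h1]
        set nb := PySem.Int.bitLength (m : Int) with hnb
        have hge2 : 2 ≤ nb := by have := pvBitLength_pos hm; omega
        set k := nb / 2 with hk
        have hk1 : 1 ≤ k := by omega
        have hkle : k ≤ nb - 1 := by omega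
        have hub : m < 2 ^ nb := by
          have := PySem.Int.lt_two_pow_bitLength (m : Int)
          simpa using this
        have hlb : 2 ^ (nb - 1) ≤ m := by
          have := PySem.Int.two_pow_bitLength_le (m : Int) (by exact_mod_cast hm)
          simpa using this
        have hpk : (2 : Nat) ^ k ≤ m := le_trans (Nat.pow_le_pow_right (by omega) hkle) hlb
        -- the low recursive argument
        have hshl : (1 <<< k : Nat) = 2 ^ k := by simp [Nat.shiftLeft_eq]
        have hlowarg : PySem.Int.band (m : Int) (((1 <<< k : Nat) : Int) - 1)
            = ((m % 2 ^ k : Nat) : Int) := by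
          rw [hshl]
          have : ((2 ^ k : Nat) : Int) - 1 = ((2 ^ k - 1 : Nat) : Int) := by
            have : (1 : Nat) ≤ 2 ^ k := Nat.one_le_two_pow
            omega
          rw [this, PySem.Int.band_natCast, Nat.and_two_pow_sub_one_eq_mod]
        -- the high recursive argument
        have hhiarg : ((m : Int) >>> k) = ((m / 2 ^ k : Nat) : Int) := by
          show ((m >>> k : Nat) : Int) = ((m / 2 ^ k : Nat) : Int)
          rw [Nat.shiftRight_eq_div_pow]
        have hlow_lt : m % 2 ^ k < m := lt_of_lt_of_le (Nat.mod_lt m (by positivity)) hpk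
        have hhi_lt : m / 2 ^ k < m :=
          Nat.div_lt_self (Nat.pos_of_ne_zero hm) (lt_of_lt_of_le (by omega) (Nat.pow_le_pow_right (by omega) hk1))
        show pySetSquares fuel (PySem.Int.band (m : Int) (((1 <<< k : Nat) : Int) - 1)) ++
            (pySetSquares fuel ((m : Int) >>> k)).map (fun s => (k : Int) + s)
          = (pvPos m 0).map (fun (s : Nat) => (s : Int))
        rw [hlowarg, hhiarg, ih (m % 2 ^ k) (by omega), ih (m / 2 ^ k) (by omega)]
        rw [pvPos_split k m 0, List.map_append]
        congr 1
        rw [show (0 : Nat) + k = k + 0 by omega, pvPos_add k (m / 2 ^ k) 0,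
            List.map_map, List.map_map]
        apply List.map_congr_left
        intro s _
        simp only [Function.comp_apply]
        push_cast
        ring

-- ===== VERDICT (by name: the statement is the Claim_ definition above) =====
theorem generate_promotions_py_spec : Claim_equal_generate_promotions_py := by
  intro to_bb shift _ hpre
  unfold Spec_generate_promotions_py
  obtain ⟨n, rfl⟩ : ∃ m : Nat, to_bb = (m : Int) := ⟨to_bb.toNat, (Int.toNat_of_nonneg hpre).symm⟩
  unfold generate_promotions_py generate_promotions_py_alt
  have hnat : ((n : Int)).natAbs = n := Int.natAbs_natCast n
  rw [hnat, pvALoop_eq_scan shift (n + 1) n (by omega), pvScan_eq_flatMap,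
      pvSetSquares_eq (n + 1) n (by omega), List.flatMap_map]
  apply List.flatMap_congr
  intro s _
  unfold pvTup
  have hnn : (0 : Int) ≤ ((s : Nat) : Int) := Int.natCast_nonneg s
  split_ifs with h1 h2 <;> first | rfl | omega
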